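-- pv_equiv track=rewrite | github.com/t-lefort/catan-bot | catan/sim/parallel.py | _distribute_episodes
-- ===== SOURCE A (Python) =====
-- from typing import Callable, Literal, Tuple
--
-- def _distribute_episodes(total_episodes: int, num_workers: int, base_seed: int) -> Tuple[Tuple[int, Tuple[int, ...]], ...]:
--     """Répartit les seeds d'épisodes entre les workers."""
--
--     base = total_episodes // num_workers
--     remainder = total_episodes % num_workers
--     current_seed = base_seed
--     assignments = []
--
--     for worker_id in range(num_workers):
--         count = base + (1 if worker_id < remainder else 0)
--         seeds = tuple(range(current_seed, current_seed + count)) if count else tuple()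
--         current_seed += count
--         assignments.append((worker_id, seeds))
--
--     return tuple(assignments)
-- ===== SOURCE B (Python) =====
-- def _distribute_episodes(total_episodes, num_workers, base_seed):
--     """Each worker's seed block is derived directly from its index (no running accumulator)."""
--     base = total_episodes // num_workers
--     remainder = total_episodes % num_workers
--     return tuple(
--         (w, tuple(range(base_seed + base * w + min(w, remainder),
--                         base_seed + base * w + min(w, remainder)
--                         + base + (1 if w < remainder else 0))))
--         for w in range(num_workers)
--     )
-- ===== Notes on version B (the rewrite author's own statement) =====
-- stated objective: simpler
-- what changed: Replaced the sequential current_seed accumulator loop with a single comprehension that computes each worker's block start in closed form (base_seed + base*w + min(w, remainder)).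
import Mathlib
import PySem

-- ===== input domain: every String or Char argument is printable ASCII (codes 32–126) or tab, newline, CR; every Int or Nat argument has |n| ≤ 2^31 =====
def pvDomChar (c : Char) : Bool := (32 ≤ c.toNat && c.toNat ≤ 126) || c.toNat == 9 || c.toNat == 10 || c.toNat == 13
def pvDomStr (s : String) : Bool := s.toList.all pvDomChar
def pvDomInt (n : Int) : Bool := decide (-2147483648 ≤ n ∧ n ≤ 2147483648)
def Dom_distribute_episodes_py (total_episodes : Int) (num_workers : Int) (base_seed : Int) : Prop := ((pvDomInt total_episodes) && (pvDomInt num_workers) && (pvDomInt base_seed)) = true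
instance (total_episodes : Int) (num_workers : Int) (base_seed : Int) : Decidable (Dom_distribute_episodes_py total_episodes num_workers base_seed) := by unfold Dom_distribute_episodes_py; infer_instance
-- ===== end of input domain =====

-- B replaces A's running current_seed accumulator by a closed-form per-worker block start; objective: simpler.

-- ===== PORT A =====
def distribute_episodes_py (total_episodes : Int) (num_workers : Int) (base_seed : Int) : List (Int × List Int) :=
  let base := PySem.Int.floordiv total_episodes num_workers
  let remainder := PySem.Int.mod total_episodes num_workers
  let st := (PySem.List.pyRange 0 num_workers 1).foldl
    (fun (acc : Int × List (Int × List Int)) worker_id =>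
      let count := base + (if worker_id < remainder then (1 : Int) else 0)
      let seeds := if count ≠ 0 then PySem.List.pyRange acc.1 (acc.1 + count) 1 else []
      (acc.1 + count, acc.2 ++ [(worker_id, seeds)]))
    (base_seed, [])
  st.2

-- ===== PORT B =====
def distribute_episodes_py_alt (total_episodes : Int) (num_workers : Int) (base_seed : Int) : List (Int × List Int) :=
  let base := PySem.Int.floordiv total_episodes num_workers
  let remainder := PySem.Int.mod total_episodes num_workers
  (PySem.List.pyRange 0 num_workers 1).map (fun w =>
    (w, PySem.List.pyRange (base_seed + base * w + min w remainder)
          (base_seed + base * w + min w remainder + base + (if w < remainder then (1 : Int) else 0)) 1))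

-- ===== PRECONDITION & SPEC =====
-- Pre_ excludes only num_workers = 0, where Python A raises ZeroDivisionError.
def Pre_distribute_episodes_py (total_episodes : Int) (num_workers : Int) (base_seed : Int) : Prop := num_workers ≠ 0
instance (total_episodes : Int) (num_workers : Int) (base_seed : Int) : Decidable (Pre_distribute_episodes_py total_episodes num_workers base_seed) := by unfold Pre_distribute_episodes_py; infer_instance
def pvWitness_distribute_episodes_py : Int × Int × Int := (7, 3, 100)

def Spec_distribute_episodes_py (total_episodes : Int) (num_workers : Int) (base_seed : Int) (out : List (Int × List Int)) : Prop := out = distribute_episodes_py_alt total_episodes num_workers base_seed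
instance (total_episodes : Int) (num_workers : Int) (base_seed : Int) (out : List (Int × List Int)) : Decidable (Spec_distribute_episodes_py total_episodes num_workers base_seed out) := by unfold Spec_distribute_episodes_py; infer_instance

-- ===== CLAIM (what is proved, stated in full; the proofs are below) =====
def Claim_equal_distribute_episodes_py : Prop := ∀ (total_episodes : Int) (num_workers : Int) (base_seed : Int), Dom_distribute_episodes_py total_episodes num_workers base_seed → Pre_distribute_episodes_py total_episodes num_workers base_seed → Spec_distribute_episodes_py total_episodes num_workers base_seed (distribute_episodes_py total_episodes num_workers base_seed)

-- ===== LEMMAS AND PROOFS =====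

-- A's conditional empty-tuple branch collapses to a single pyRange.
lemma pv_cell (start base c : Int) :
    (if (base + c) ≠ 0 then PySem.List.pyRange start (start + (base + c)) 1 else [])
      = PySem.List.pyRange start (start + base + c) 1 := by
  by_cases h : base + c = 0
  · simp [h, PySem.List.pyRange_one_eq_nil (by omega : start + base + c ≤ start)]
  · simp only [h, ne_eq, not_false_eq_true, if_true]
    congr 1; ring

-- One step of A's running seed matches the closed form.
lemma pv_seedstep (base rem s k : Int) :
    s + base * k + min k rem + (base + if k < rem then (1 : Int) else 0)
      = s + base * (k + 1) + min (k + 1) rem := by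
  have hmin : min k rem + (if k < rem then (1 : Int) else 0) = min (k + 1) rem := by
    split_ifs with h <;> omega
  linear_combination hmin

-- Invariant: after processing workers 0..m-1, A's running seed equals the closed form
-- s + base*m + min m rem, and the accumulated list equals B's map over range 0 m.
lemma pv_inv (base rem s : Int) (hrem : 0 ≤ rem) (m : Nat) :
    (PySem.List.pyRange 0 (m : Int) 1).foldl
      (fun (acc : Int × List (Int × List Int)) worker_id =>
        let count := base + (if worker_id < rem then (1 : Int) else 0)
        let seeds := if count ≠ 0 then PySem.List.pyRange acc.1 (acc.1 + count) 1 else []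
        (acc.1 + count, acc.2 ++ [(worker_id, seeds)]))
      (s, [])
    = (s + base * m + min (m : Int) rem,
       (PySem.List.pyRange 0 (m : Int) 1).map (fun w =>
         (w, PySem.List.pyRange (s + base * w + min w rem)
               (s + base * w + min w rem + base + (if w < rem then (1 : Int) else 0)) 1))) := by
  induction m with
  | zero =>
    rw [PySem.List.pyRange_one_eq_nil (by simp)]
    simp
    omega
  | succ k ih =>
    have hsplit : PySem.List.pyRange 0 ((k + 1 : Nat) : Int) 1
        = PySem.List.pyRange 0 (k : Int) 1 ++ [(k : Int)] := by
      push_cast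
      exact PySem.List.pyRange_one_succ_right (by positivity)
    rw [hsplit, List.foldl_append, List.map_append, ih]
    simp only [List.foldl_cons, List.foldl_nil, List.map_cons, List.map_nil]
    rw [Prod.mk.injEq]
    refine ⟨?_, ?_⟩
    · push_cast
      exact pv_seedstep base rem s (k : Int)
    · rw [pv_cell]

lemma pv_main (total_episodes num_workers base_seed : Int) (hn : num_workers ≠ 0) :
    distribute_episodes_py total_episodes num_workers base_seed
      = distribute_episodes_py_alt total_episodes num_workers base_seed := by
  unfold distribute_episodes_py distribute_episodes_py_alt
  rcases lt_or_gt_of_ne hn with hneg | hpos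
  · rw [PySem.List.pyRange_one_eq_nil (by omega)]
    simp
  · have hrem : 0 ≤ PySem.Int.mod total_episodes num_workers :=
      PySem.Int.mod_nonneg total_episodes hpos
    lift num_workers to ℕ using (le_of_lt hpos) with m hm
    simpa using congrArg Prod.snd
      (pv_inv (PySem.Int.floordiv total_episodes (m : Int))
        (PySem.Int.mod total_episodes (m : Int)) base_seed hrem m)

-- ===== VERDICT (by name: the statement is the Claim_ definition above) =====
theorem distribute_episodes_py_spec : Claim_equal_distribute_episodes_py := by
  intro t n s _ hpre
  exact pv_main t n s hpre
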